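-- pv_equiv track=rewrite | github.com/afatka/_FullSail_Tools | buildSchedule.py | get_day_index
-- ===== SOURCE A (Python) =====
-- def get_day_index(day_list, weekday, recursion_count = 0):
--
-- 	# log('day_list: {}'.format(day_list))
-- 	# log('weekday: {}'.format(weekday))
--
-- 	recursion_count += 1
-- 	if recursion_count > 10:
-- 		# log('Maximum Recursion Reached!')
-- 		# log('day_list: {}'.format(day_list))
-- 		# log('weekday: {}'.format(weekday))
-- 		raise Exception('Recursion Maximum Reached!')
--
-- 	if len(day_list) < 1:
-- 		# log('day_list: {}'.format(day_list))
-- 		# log('weekday: {}'.format(weekday))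
-- 		return 0
-- 		# raise Exception('Day List is empty')
--
-- 	weekdays_list = ['Sun', 'Mon', 'Tue', 'Wed', 'Thu', 'Fri', 'Sat']
--
-- 	try:
-- 		day_index = (len(day_list) - 1) - day_list[::-1].index(weekday)
-- 		# log('index: {}'.format(day_index))
-- 		return day_index
-- 	except ValueError as e:
-- 		# warnings.warn('Day {}.'.format(e))
-- 		prior_day_index = weekdays_list.index(weekday) - 1
-- 		# log('prior_day_index: {}'.format(prior_day_index))
-- 		if prior_day_index < 0:
-- 			# log('IS LESS THAN ZERO')
-- 			return prior_day_index
-- 			# prior_day_index = len(weekdays_list) - 1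
--
-- 		return get_day_index(day_list, weekdays_list[prior_day_index], recursion_count = recursion_count)
-- ===== SOURCE B (Python) =====
-- def get_day_index(day_list, weekday, recursion_count=0):
--     if not day_list:
--         return 0
--     last = {}
--     for i, d in enumerate(day_list):
--         last[d] = i
--     if weekday in last:
--         return last[weekday]
--     weekdays_list = ['Sun', 'Mon', 'Tue', 'Wed', 'Thu', 'Fri', 'Sat']
--     start = weekdays_list.index(weekday)
--     for j in range(start - 1, -1, -1):
--         if weekdays_list[j] in last:
--             return last[weekdays_list[j]]
--     return -1
-- ===== Notes on version B (the rewrite author's own statement) =====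
-- stated objective: alternative
-- what changed: Replaces A's tail recursion over prior weekdays (each call rescanning the reversed list with .index) with a single pass building a last-occurrence dict, a direct lookup, and one downward scan over weekday positions; B drops the recursion-depth counter its loop never needs.
import Mathlib
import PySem

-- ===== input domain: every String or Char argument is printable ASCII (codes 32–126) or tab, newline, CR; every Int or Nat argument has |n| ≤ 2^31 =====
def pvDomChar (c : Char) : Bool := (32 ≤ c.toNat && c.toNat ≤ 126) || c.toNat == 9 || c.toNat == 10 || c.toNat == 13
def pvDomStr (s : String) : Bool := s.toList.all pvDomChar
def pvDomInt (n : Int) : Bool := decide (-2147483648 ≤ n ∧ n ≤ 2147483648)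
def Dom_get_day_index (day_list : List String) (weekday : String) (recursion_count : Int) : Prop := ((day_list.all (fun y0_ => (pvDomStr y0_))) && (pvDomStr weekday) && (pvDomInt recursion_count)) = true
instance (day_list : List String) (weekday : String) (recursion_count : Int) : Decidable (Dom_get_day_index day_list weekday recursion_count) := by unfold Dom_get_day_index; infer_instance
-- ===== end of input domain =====

-- B replaces A's tail recursion over prior weekdays (one reversed .index scan per call)
-- by a last-occurrence dict built in one pass plus a downward scan over weekday positions (objective: alternative).


-- the literal weekdays_list both Pythons define locally
def pvWdays : List String := ["Sun", "Mon", "Tue", "Wed", "Thu", "Fri", "Sat"]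

-- ===== PORT A =====
def get_day_index (day_list : List String) (weekday : String) (recursion_count : Int) : Int :=
  -- recursion_count += 1; if recursion_count > 10: raise  (raise = outside Pre_, dummy 0)
  if 10 < recursion_count + 1 then 0
  else if day_list.length < 1 then 0
  else
    -- day_list[::-1].index(weekday); ValueError caught by the except branch
    match PySem.List.index? ((PySem.List.slice? day_list none none (-1)).getD []) weekday with
    | some k => (day_list.length : Int) - 1 - (k : Int)
    | none =>
      -- weekdays_list.index(weekday); an uncaught ValueError = outside Pre_, dummy 0
      match PySem.List.index? pvWdays weekday with
      | none => 0
      | some wi =>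
        let prior : Int := (wi : Int) - 1
        if prior < 0 then prior
        else get_day_index day_list (PySem.List.pyGetD pvWdays prior "") (recursion_count + 1)
termination_by (10 - recursion_count).toNat
decreasing_by omega

-- ===== PORT B =====
-- last = {}; for i, d in enumerate(day_list): last[d] = i
def pvLastDict (day_list : List String) : PySem.Dict String Int :=
  (PySem.List.enumerate day_list 0).foldl (fun d p => d.insert p.2 p.1) PySem.Dict.empty

-- for j in range(start-1, -1, -1): if weekdays_list[j] in last: return last[weekdays_list[j]]; return -1
def pvScan (last : PySem.Dict String Int) : List Int → Int
  | [] => -1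
  | j :: rest =>
    match last.get? (PySem.List.pyGetD pvWdays j "") with
    | some v => v
    | none => pvScan last rest

def get_day_index_alt (day_list : List String) (weekday : String) (recursion_count : Int) : Int :=
  if day_list.length = 0 then 0
  else
    let last := pvLastDict day_list
    match last.get? weekday with
    | some v => v
    | none =>
      -- weekdays_list.index(weekday): an uncaught ValueError = outside Pre_, dummy 0
      match PySem.List.index? pvWdays weekday with
      | none => 0
      | some start => pvScan last (PySem.List.pyRange ((start : Int) - 1) (-1) (-1))

-- ===== PRECONDITION & SPEC =====
-- Pre_ = exactly the inputs on which Python A returns: recursion_count ≤ 9 and either the list is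
-- empty, or weekday occurs in it, or weekday is a weekday name whose fallback chain (down to the
-- nearest prior weekday present in the list, else down to 'Sun') ends before the recursion cap of 10;
-- outside it A raises (Exception at the cap, ValueError for a non-weekday not in the list).
def Pre_get_day_index (day_list : List String) (weekday : String) (recursion_count : Int) : Prop :=
  recursion_count ≤ 9 ∧
    (day_list = [] ∨ weekday ∈ day_list ∨
      ∃ i : Nat, i < 7 ∧ pvWdays.getD i "" = weekday ∧
        ((∃ j : Nat, j ≤ i ∧ pvWdays.getD j "" ∈ day_list ∧ recursion_count + ((i : Int) - (j : Int)) + 1 ≤ 10) ∨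
          recursion_count + (i : Int) + 1 ≤ 10))
instance (day_list : List String) (weekday : String) (recursion_count : Int) : Decidable (Pre_get_day_index day_list weekday recursion_count) := by unfold Pre_get_day_index; infer_instance

def pvWitness_get_day_index : List String × String × Int := (["Mon", "Wed"], "Fri", 0)

def Spec_get_day_index (day_list : List String) (weekday : String) (recursion_count : Int) (out : Int) : Prop := out = get_day_index_alt day_list weekday recursion_count
instance (day_list : List String) (weekday : String) (recursion_count : Int) (out : Int) : Decidable (Spec_get_day_index day_list weekday recursion_count out) := by unfold Spec_get_day_index; infer_instance

-- ===== CLAIM (what is proved, stated in full; the proofs are below) =====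
def Claim_equal_get_day_index : Prop := ∀ (day_list : List String) (weekday : String) (recursion_count : Int), Dom_get_day_index day_list weekday recursion_count → Pre_get_day_index day_list weekday recursion_count → Spec_get_day_index day_list weekday recursion_count (get_day_index day_list weekday recursion_count)

-- ===== LEMMAS AND PROOFS =====

-- the dict built by B's loop looks up the LAST occurrence = A's (len-1) - reversed.index
lemma pv_build_get (w : String) : ∀ (xs : List String) (s : Int) (d : PySem.Dict String Int),
    ((PySem.List.enumerate xs s).foldl (fun d p => d.insert p.2 p.1) d).get? w =
      (match PySem.List.index? xs.reverse w with
       | some k => some (s + (xs.length : Int) - 1 - (k : Int))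
       | none => d.get? w) := by
  intro xs
  induction xs with
  | nil => intro s d; simp [PySem.List.enumerate, PySem.List.index?_eq_idxOf?]
  | cons x t ih =>
    intro s d
    show ((PySem.List.enumerate t (s + 1)).foldl (fun d p => d.insert p.2 p.1) (d.insert x s)).get? w = _
    rw [ih]
    rcases h : PySem.List.index? t.reverse w with _ | k
    · have hwmem : w ∉ t.reverse := by
        rw [← PySem.List.index?_eq_none_iff (v := w) (xs := t.reverse)]; exact h
      by_cases hxw : x = w
      · subst hxw
        rw [show (x :: t).reverse = t.reverse ++ [x] by simp,
          PySem.List.index?_append_singleton_self t.reverse x hwmem]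
        simp [PySem.Dict.get?_insert_self]
        ring
      · have : PySem.List.index? (x :: t).reverse w = none := by
          rw [PySem.List.index?_eq_none_iff]
          simp only [List.reverse_cons, List.mem_append, List.mem_singleton]
          rintro (hc | hc)
          · exact hwmem hc
          · exact hxw hc.symm
        rw [this, PySem.Dict.get?_insert_of_ne _ _ (fun h => hxw h.symm)]
    · have hmem : w ∈ t.reverse := by
        have := PySem.List.index?_isSome_iff (xs := t.reverse) (v := w)
        rw [h] at this; simpa using this.mp rfl
      rw [show (x :: t).reverse = t.reverse ++ [x] by simp,
        PySem.List.index?_append_of_mem _ hmem, h]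
      simp; ring

lemma pv_widx (i : Nat) (h : i < 7) :
    PySem.List.index? pvWdays (pvWdays.getD i "") = some i := by
  interval_cases i <;> decide

-- the cap-safety part of Pre_ for a chain starting at weekday index i
def pvCapOK (day_list : List String) (rc : Int) (i : Nat) : Prop :=
  (∃ j : Nat, j ≤ i ∧ pvWdays.getD j "" ∈ day_list ∧ rc + ((i : Int) - (j : Int)) + 1 ≤ 10) ∨
    rc + (i : Int) + 1 ≤ 10

lemma pvCapOK_le (day_list : List String) (rc : Int) (i : Nat) (h : pvCapOK day_list rc i) :
    rc + 1 ≤ 10 := by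
  rcases h with ⟨j, hj, _, hle⟩ | hle <;> omega

-- A's fallback recursion from weekday index i equals B's found-branch / downward scan
lemma pv_chain : ∀ (i : Nat), i < 7 → ∀ (xs : List String) (rc : Int), 1 ≤ xs.length →
    pvCapOK xs rc i →
    get_day_index xs (pvWdays.getD i "") rc =
      (match PySem.List.index? xs.reverse (pvWdays.getD i "") with
       | some k => (xs.length : Int) - 1 - (k : Int)
       | none => pvScan (pvLastDict xs) (PySem.List.pyRange ((i : Int) - 1) (-1) (-1))) := by
  intro i
  induction i with
  | zero =>
    intro _ xs rc hlen hcap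
    rw [get_day_index]
    have hrc := pvCapOK_le _ _ _ hcap
    rw [if_neg (by omega), if_neg (by omega), PySem.List.slice?_none_none_neg_one]
    simp only [Option.getD_some]
    rcases h : PySem.List.index? xs.reverse (pvWdays.getD 0 "") with _ | k
    · rw [pv_widx 0 (by omega)]
      simp only [Nat.cast_zero]
      rw [if_pos (by omega)]
      rw [PySem.List.pyRange_neg_one_eq_nil (by omega)]
      rfl
    · rfl
  | succ i ih =>
    intro hi7 xs rc hlen hcap
    rw [get_day_index]
    have hrc := pvCapOK_le _ _ _ hcap
    rw [if_neg (by omega), if_neg (by omega), PySem.List.slice?_none_none_neg_one]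
    simp only [Option.getD_some]
    rcases h : PySem.List.index? xs.reverse (pvWdays.getD (i + 1) "") with _ | k
    · -- weekday (i+1) not in xs: A recurses at i, B's scan starts at i
      have hnm : pvWdays.getD (i + 1) "" ∉ xs := by
        have := (PySem.List.index?_eq_none_iff (xs := xs.reverse) (v := pvWdays.getD (i + 1) "")).mp h
        simpa using this
      rw [pv_widx (i + 1) hi7]
      simp only []
      rw [if_neg (by push_cast; omega)]
      have hidx : PySem.List.pyGetD pvWdays (((i + 1 : Nat) : Int) - 1) "" = pvWdays.getD i "" := by
        have : ((i + 1 : Nat) : Int) - 1 = ((i : Nat) : Int) := by push_cast; omega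
        rw [this, PySem.List.pyGetD_natCast]
      rw [hidx]
      have hcap' : pvCapOK xs (rc + 1) i := by
        rcases hcap with ⟨j, hj, hmem, hle⟩ | hle
        · rcases Nat.lt_or_ge j (i + 1) with hji | hji
          · exact Or.inl ⟨j, by omega, hmem, by push_cast at hle ⊢; omega⟩
          · exfalso
            have : j = i + 1 := by omega
            subst this; exact hnm hmem
        · exact Or.inr (by push_cast at hle ⊢; omega)
      rw [ih (by omega) xs (rc + 1) hlen hcap']
      -- now unfold one step of B's scan on the right
      have hr : PySem.List.pyRange (((i + 1 : Nat) : Int) - 1) (-1) (-1) =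
          ((i : Nat) : Int) :: PySem.List.pyRange (((i : Nat) : Int) - 1) (-1) (-1) := by
        have h1 : ((i + 1 : Nat) : Int) - 1 = ((i : Nat) : Int) := by push_cast; omega
        rw [h1, PySem.List.pyRange_neg_one_cons (by omega)]
      rw [hr]
      show _ = pvScan (pvLastDict xs) _
      rw [pvScan]
      rw [show PySem.List.pyGetD pvWdays ((i : Nat) : Int) "" = pvWdays.getD i "" from
        PySem.List.pyGetD_natCast ..]
      rw [show (pvLastDict xs).get? (pvWdays.getD i "") = _ from pv_build_get _ xs 0 _]
      rcases h2 : PySem.List.index? xs.reverse (pvWdays.getD i "") with _ | k2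
      · simp [PySem.Dict.get?_empty]
      · simp only []
        ring_nf
    · rfl

theorem pv_main : ∀ (day_list : List String) (weekday : String) (recursion_count : Int),
    Pre_get_day_index day_list weekday recursion_count →
    get_day_index day_list weekday recursion_count = get_day_index_alt day_list weekday recursion_count := by
  intro xs w rc ⟨hrc, hcase⟩
  rcases hcase with hnil | hmem | ⟨i, hi7, hwi, hcap⟩
  · subst hnil
    rw [get_day_index, if_neg (by omega : ¬ (10:Int) < rc + 1)]
    simp [get_day_index_alt]
  · -- weekday present in the list: A's reversed .index hit = B's dict hit
    have hlen : 1 ≤ xs.length := List.length_pos_of_mem hmem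
    rcases h : PySem.List.index? xs.reverse w with _ | k
    · exfalso
      exact (PySem.List.index?_eq_none_iff _ _).mp h (List.mem_reverse.mpr hmem)
    · rw [get_day_index]
      rw [if_neg (by omega), if_neg (by omega), PySem.List.slice?_none_none_neg_one]
      simp only [Option.getD_some]
      rw [h, get_day_index_alt.eq_def, if_neg (by omega)]
      simp only []
      rw [show (pvLastDict xs).get? w = _ from pv_build_get _ xs 0 _, h]
      simp only []
      ring_nf
  · subst hwi
    rcases Nat.eq_zero_or_pos xs.length with hlen | hlen
    · -- empty list inside the weekday-chain disjunct
      have : xs = [] := List.eq_nil_of_length_eq_zero hlen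
      subst this
      rw [get_day_index, if_neg (by omega : ¬ (10:Int) < rc + 1)]
      simp [get_day_index_alt]
    · rw [pv_chain i hi7 xs rc hlen hcap, get_day_index_alt.eq_def, if_neg (by omega)]
      simp only []
      rw [show (pvLastDict xs).get? (pvWdays.getD i "") = _ from pv_build_get _ xs 0 _]
      rcases h : PySem.List.index? xs.reverse (pvWdays.getD i "") with _ | k
      · rcases h2 : PySem.List.index? pvWdays (pvWdays.getD i "") with _ | wi
        · rw [pv_widx i hi7] at h2; exact absurd h2 (by simp)
        · rw [pv_widx i hi7] at h2
          injection h2 with h2; subst h2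
          rfl
      · simp only []
        ring_nf

-- ===== VERDICT (by name: the statement is the Claim_ definition above) =====
theorem get_day_index_spec : Claim_equal_get_day_index := by
  intro day_list weekday recursion_count _ hpre
  unfold Spec_get_day_index
  exact pv_main day_list weekday recursion_count hpre
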